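-- pv_equiv track=rewrite | github.com/Thyodas/advent_of_code2021 | day08/ex2.py | determine_unique
-- ===== SOURCE A (Python) =====
-- def determine_unique(digits):
--     association = {2:1, 4:4, 3:7, 7:8}
--     unique_dict = {1:"", 4:"", 7:"", 8:""}
--     for digit in digits:
--         size = len(digit)
--         if size in association:
--             unique_dict[association[size]] = digit
--     return unique_dict
-- ===== SOURCE B (Python) =====
-- def determine_unique(digits):
--     def last_with_len(n):
--         for d in reversed(digits):
--             if len(d) == n:
--                 return d
--         return ""
--     return {1: last_with_len(2), 4: last_with_len(4), 7: last_with_len(3), 8: last_with_len(7)}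
-- ===== Notes on version B (the rewrite author's own statement) =====
-- stated objective: alternative
-- what changed: B drops A's single forward pass with a conditional dict write entirely: for each of the four target lengths it scans the list backwards and takes the first string of that length (= A's last-write-wins), building the result from four independent searches with no dict and no per-element branch-and-store.
import Mathlib
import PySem

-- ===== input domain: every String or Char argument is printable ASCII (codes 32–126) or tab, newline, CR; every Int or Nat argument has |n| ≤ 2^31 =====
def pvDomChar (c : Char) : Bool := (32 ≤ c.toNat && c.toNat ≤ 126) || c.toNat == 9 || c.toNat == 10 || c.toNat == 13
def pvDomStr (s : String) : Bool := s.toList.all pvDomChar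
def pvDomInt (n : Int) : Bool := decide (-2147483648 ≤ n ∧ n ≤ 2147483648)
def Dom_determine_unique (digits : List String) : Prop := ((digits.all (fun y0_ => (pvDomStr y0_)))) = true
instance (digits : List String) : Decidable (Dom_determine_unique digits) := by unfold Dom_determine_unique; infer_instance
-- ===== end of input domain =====

-- B replaces A's forward pass with conditional dict writes by four independent backward searches (first match in the reversed list = A's last write per length); objective: alternative decomposition, same cost.


-- ===== PORT A =====
def determine_unique (digits : List String) : List (Int × String) :=
  let association : PySem.Dict Int Int := PySem.Dict.ofList [(2, 1), (4, 4), (3, 7), (7, 8)]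
  let unique_dict : PySem.Dict Int String := PySem.Dict.ofList [(1, ""), (4, ""), (7, ""), (8, "")]
  let ud := digits.foldl (fun ud digit =>
    let size := PySem.Str.len digit
    if association.contains size then ud.insert (association.getD size 0) digit else ud) unique_dict
  ud.items

-- ===== PORT B =====
-- 'for d in reversed(digits): if len(d) == n: return d' then 'return ""' = first match in digits.reverse, default ""
def pvLastWithLen (digits : List String) (n : Int) : String :=
  (digits.reverse.find? (fun d => PySem.Str.len d == n)).getD ""

def determine_unique_alt (digits : List String) : List (Int × String) :=
  [(1, pvLastWithLen digits 2), (4, pvLastWithLen digits 4),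
   (7, pvLastWithLen digits 3), (8, pvLastWithLen digits 7)]

-- ===== PRECONDITION & SPEC =====
def Spec_determine_unique (digits : List String) (out : List (Int × String)) : Prop := out = determine_unique_alt digits
instance (digits : List String) (out : List (Int × String)) : Decidable (Spec_determine_unique digits out) := by unfold Spec_determine_unique; infer_instance

-- ===== CLAIM (what is proved, stated in full; the proofs are below) =====
def Claim_equal_determine_unique : Prop := ∀ (digits : List String), Dom_determine_unique digits → Spec_determine_unique digits (determine_unique digits)

-- ===== LEMMAS AND PROOFS =====
theorem pv_last_append (xs : List String) (d : String) (n : Int) :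
    pvLastWithLen (xs ++ [d]) n = if PySem.Str.len d == n then d else pvLastWithLen xs n := by
  simp [pvLastWithLen, List.find?]
  split <;> simp_all
def pvMk4 (digits : List String) : PySem.Dict Int String :=
  PySem.Dict.mk [(1, pvLastWithLen digits 2), (4, pvLastWithLen digits 4),
                 (7, pvLastWithLen digits 3), (8, pvLastWithLen digits 7)]
theorem pv_contains_false (n : Int) (h2 : n ≠ 2) (h3 : n ≠ 3) (h4 : n ≠ 4) (h7 : n ≠ 7) :
    ((PySem.Dict.ofList [((2:Int), (1:Int)), (4, 4), (3, 7), (7, 8)]).contains n) = false := by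
  rw [show (PySem.Dict.ofList [((2:Int), (1:Int)), (4, 4), (3, 7), (7, 8)])
        = PySem.Dict.mk [((2:Int), (1:Int)), (4, 4), (3, 7), (7, 8)] from rfl,
     PySem.Dict.contains_eq_decide_mem_keys]
  simp
  omega
theorem pv_step (xs : List String) (d : String) :
    (if (PySem.Dict.ofList [((2:Int), (1:Int)), (4, 4), (3, 7), (7, 8)]).contains (PySem.Str.len d) then
       (pvMk4 xs).insert ((PySem.Dict.ofList [((2:Int), (1:Int)), (4, 4), (3, 7), (7, 8)]).getD (PySem.Str.len d) 0) d
     else pvMk4 xs)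
    = pvMk4 (xs ++ [d]) := by
  have hla := pv_last_append xs d
  by_cases h2 : PySem.Str.len d = 2
  · rw [h2] at hla ⊢
    rw [if_pos (show ((PySem.Dict.ofList [((2:Int), (1:Int)), (4, 4), (3, 7), (7, 8)]).contains 2) = true from rfl), show ((PySem.Dict.ofList [((2:Int), (1:Int)), (4, 4), (3, 7), (7, 8)]).getD 2 0) = 1 from rfl]
    show PySem.Dict.mk [(1, d), (4, pvLastWithLen xs 4), (7, pvLastWithLen xs 3), (8, pvLastWithLen xs 7)]
       = pvMk4 (xs ++ [d])
    rw [pvMk4, hla 2, hla 4, hla 3, hla 7]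
    norm_num
  by_cases h4 : PySem.Str.len d = 4
  · rw [h4] at hla ⊢
    rw [if_pos (show ((PySem.Dict.ofList [((2:Int), (1:Int)), (4, 4), (3, 7), (7, 8)]).contains 4) = true from rfl), show ((PySem.Dict.ofList [((2:Int), (1:Int)), (4, 4), (3, 7), (7, 8)]).getD 4 0) = 4 from rfl]
    show PySem.Dict.mk [(1, pvLastWithLen xs 2), (4, d), (7, pvLastWithLen xs 3), (8, pvLastWithLen xs 7)]
       = pvMk4 (xs ++ [d])
    rw [pvMk4, hla 2, hla 4, hla 3, hla 7]
    norm_num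
  by_cases h3 : PySem.Str.len d = 3
  · rw [h3] at hla ⊢
    rw [if_pos (show ((PySem.Dict.ofList [((2:Int), (1:Int)), (4, 4), (3, 7), (7, 8)]).contains 3) = true from rfl), show ((PySem.Dict.ofList [((2:Int), (1:Int)), (4, 4), (3, 7), (7, 8)]).getD 3 0) = 7 from rfl]
    show PySem.Dict.mk [(1, pvLastWithLen xs 2), (4, pvLastWithLen xs 4), (7, d), (8, pvLastWithLen xs 7)]
       = pvMk4 (xs ++ [d])
    rw [pvMk4, hla 2, hla 4, hla 3, hla 7]
    norm_num
  by_cases h7 : PySem.Str.len d = 7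
  · rw [h7] at hla ⊢
    rw [if_pos (show ((PySem.Dict.ofList [((2:Int), (1:Int)), (4, 4), (3, 7), (7, 8)]).contains 7) = true from rfl), show ((PySem.Dict.ofList [((2:Int), (1:Int)), (4, 4), (3, 7), (7, 8)]).getD 7 0) = 8 from rfl]
    show PySem.Dict.mk [(1, pvLastWithLen xs 2), (4, pvLastWithLen xs 4), (7, pvLastWithLen xs 3), (8, d)]
       = pvMk4 (xs ++ [d])
    rw [pvMk4, hla 2, hla 4, hla 3, hla 7]
    norm_num
  · rw [if_neg (by rw [pv_contains_false _ h2 h3 h4 h7]; exact Bool.false_ne_true)]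
    simp only [pvMk4, hla, beq_iff_eq]
    simp only [PySem.Str.len] at h2 h3 h4 h7
    simp
    exact ⟨fun h => absurd h h2, fun h => absurd h h4, fun h => absurd h h3, fun h => absurd h h7⟩

theorem pv_loop (digits : List String) :
    digits.foldl (fun ud digit =>
        let size := PySem.Str.len digit
        if (PySem.Dict.ofList [((2:Int), (1:Int)), (4, 4), (3, 7), (7, 8)]).contains size then
          ud.insert ((PySem.Dict.ofList [((2:Int), (1:Int)), (4, 4), (3, 7), (7, 8)]).getD size 0) digit
        else ud) (pvMk4 [])
      = pvMk4 digits := by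
  induction digits using List.reverseRecOn with
  | nil => rfl
  | append_singleton xs d ih =>
    rw [List.foldl_append, ih, List.foldl_cons, List.foldl_nil]
    exact pv_step xs d

-- ===== VERDICT (by name: the statement is the Claim_ definition above) =====
theorem determine_unique_spec : Claim_equal_determine_unique := by
  intro digits _
  show determine_unique digits = determine_unique_alt digits
  show (digits.foldl (fun ud digit =>
        let size := PySem.Str.len digit
        if (PySem.Dict.ofList [((2:Int), (1:Int)), (4, 4), (3, 7), (7, 8)]).contains size then
          ud.insert ((PySem.Dict.ofList [((2:Int), (1:Int)), (4, 4), (3, 7), (7, 8)]).getD size 0) digit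
        else ud) (PySem.Dict.ofList [((1:Int), ""), (4, ""), (7, ""), (8, "")])).items
      = determine_unique_alt digits
  rw [show (PySem.Dict.ofList [((1:Int), ""), (4, ""), (7, ""), (8, "")]) = pvMk4 [] from rfl, pv_loop]
  rfl
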